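-- pv_equiv track=rewrite | github.com/buyaoxiangtale/chemistry-lab-design | chemistry_lab_agent_new.py | parse_equipment_response
-- ===== SOURCE A (Python) =====
-- from typing import Dict, Tuple
--
-- def parse_equipment_response(response_text: str) -> Tuple[Dict[str, str], Dict[str, str]]:
--     """
--     Parse the API response and extract equipment into two categories
--     Returns: Tuple of (large_equipment, small_equipment) dictionaries
--     """
--     large_equipment = {}
--     small_equipment = {}
--
--     current_category = None
--     current_item = None
--     current_description = []
--
--     # Split the response into lines and process each line
--     for line in response_text.split('\n'):
--         line = line.strip()
--
--         # Skip empty lines, headers and separator lines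
--         if not line or line.startswith('---') or line.startswith('###') or line.startswith('####'):
--             continue
--
--         # Check for category headers
--         if "Category 1" in line:
--             current_category = "large"
--             continue
--         elif "Category 2" in line:
--             current_category = "small"
--             continue
--
--         # Check for new item (usually starts with *)
--         if line.startswith('*   **') and '**' in line:
--             # Save previous item if exists
--             if current_item and current_description:
--                 description = ' '.join(current_description).strip()
--                 if current_category == "large":
--                     large_equipment[current_item] = description
--                 elif current_category == "small":
--                     small_equipment[current_item] = description
--
--             # Extract new item name (remove the ** markers)
--             current_item = line.split('**')[1].strip()
--             current_description = []
--
--         # Add description lines (skip nested asterisks)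
--         elif current_item and line and not line.startswith('*   **'):
--             # Remove asterisks and clean up the line
--             cleaned_line = line.replace('*   ', '').replace('*', '').strip()
--             if cleaned_line:
--                 current_description.append(cleaned_line)
--
--     # Save the last item
--     if current_item and current_description:
--         description = ' '.join(current_description).strip()
--         if current_category == "large":
--             large_equipment[current_item] = description
--         elif current_category == "small":
--             small_equipment[current_item] = description
--
--     return large_equipment, small_equipment
-- ===== SOURCE B (Python) =====
-- def parse_equipment_response(response_text):
--     """Two-pass re-implementation: tokenize lines, group tokens into item
--     blocks, then build the two dicts from the blocks."""
--     return _build(*_group(_tokenize(response_text)))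
--
--
-- def _tokenize(text):
--     """One token per meaningful line: ('cat', c), ('item', name) or ('desc', cleaned)."""
--     toks = []
--     for raw in text.split('\n'):
--         line = raw.strip()
--         if not line or line.startswith('---') or line.startswith('###'):
--             continue
--         if "Category 1" in line:
--             toks.append(('cat', 'large'))
--         elif "Category 2" in line:
--             toks.append(('cat', 'small'))
--         elif line.startswith('*   **') and '**' in line:
--             toks.append(('item', line.split('**')[1].strip()))
--         else:
--             cleaned = line.replace('*   ', '').replace('*', '').strip()
--             if cleaned:
--                 toks.append(('desc', cleaned))
--     return toks
--
--
-- def _group(toks):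
--     """Split the token stream at item tokens: category values seen before the
--     first item, and one (name, following-tokens) block per item."""
--     lead = []
--     blocks = []
--     for tok in toks:
--         if tok[0] == 'item':
--             blocks.append((tok[1], []))
--         elif blocks:
--             blocks[-1][1].append(tok)
--         elif tok[0] == 'cat':
--             lead.append(tok[1])
--     return lead, blocks
--
--
-- def _build(lead, blocks):
--     cat = lead[-1] if lead else None
--     large = {}
--     small = {}
--     for name, block in blocks:
--         desc = ' '.join(v for k, v in block if k == 'desc')
--         for k, v in block:
--             if k == 'cat':
--                 cat = v
--         if name and desc:
--             if cat == 'large':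
--                 large[name] = desc
--             elif cat == 'small':
--                 small[name] = desc
--     return large, small
-- ===== Notes on version B (the rewrite author's own statement) =====
-- stated objective: alternative
-- what changed: A's single-pass line loop with mutable parser state and duplicated flush-at-end logic is replaced by a three-phase pipeline: tokenize lines into category/item/description tokens, group the token stream into per-item blocks, then build the two dicts from the blocks, so the save-item code exists once and parsing is separated from dict construction.
import Mathlib
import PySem

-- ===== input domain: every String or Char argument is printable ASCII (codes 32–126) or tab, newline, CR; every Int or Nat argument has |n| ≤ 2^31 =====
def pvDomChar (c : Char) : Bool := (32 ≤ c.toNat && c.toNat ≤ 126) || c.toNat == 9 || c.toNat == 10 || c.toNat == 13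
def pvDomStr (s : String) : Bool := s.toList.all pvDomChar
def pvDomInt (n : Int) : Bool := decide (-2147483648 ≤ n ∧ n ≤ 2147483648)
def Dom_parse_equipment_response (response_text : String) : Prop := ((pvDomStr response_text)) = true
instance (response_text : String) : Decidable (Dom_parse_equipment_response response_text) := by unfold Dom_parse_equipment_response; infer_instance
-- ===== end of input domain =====

-- B re-decomposes A's one-pass line state machine into tokenize / group-into-blocks / build
-- phases (objective: alternative decomposition, same output and cost).

-- ===== PORT A =====
-- A keeps a running state (current_category, current_item, current_description, large, small)
-- over the lines; this is that state.
abbrev PvD := PySem.Dict String String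
abbrev PvSt := Option String × Option String × List String × PvD × PvD

-- Python truthiness of current_item (None or "" is falsy)
def pvItemTruthy : Option String → Bool
  | none => false
  | some s => !(s == "")

-- the duplicated "save previous item" code of A
def pvFlush (cat item : Option String) (desc : List String) (large small : PvD) : PvD × PvD :=
  if pvItemTruthy item && !desc.isEmpty then
    let description := PySem.Str.strip (PySem.Str.join " " desc)
    if cat == some "large" then (large.insert (item.getD "") description, small)
    else if cat == some "small" then (large, small.insert (item.getD "") description)
    else (large, small)
  else (large, small)

def pvAStep (st : PvSt) (raw : String) : PvSt :=
  let (cat, item, desc, large, small) := st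
  let line := PySem.Str.strip raw
  if line == "" || PySem.Str.startswith line "---" || PySem.Str.startswith line "###"
      || PySem.Str.startswith line "####" then st
  else if PySem.Str.isIn "Category 1" line then (some "large", item, desc, large, small)
  else if PySem.Str.isIn "Category 2" line then (some "small", item, desc, large, small)
  else if PySem.Str.startswith line "*   **" && PySem.Str.isIn "**" line then
    let r := pvFlush cat item desc large small
    -- line.split('**')[1]: '**' in line guarantees at least two parts, so pyGet? is never none
    let newItem := PySem.Str.strip ((PySem.List.pyGet? (((PySem.Str.split? line "**").getD [])) 1).getD "")
    (cat, some newItem, [], r.1, r.2)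
  else if pvItemTruthy item && !(line == "") && !(PySem.Str.startswith line "*   **") then
    let cleaned := PySem.Str.strip (PySem.Str.replace (PySem.Str.replace line "*   " "") "*" "")
    if !(cleaned == "") then (cat, item, desc ++ [cleaned], large, small) else st
  else st

def parse_equipment_response (response_text : String) :
    (List (String × String)) × (List (String × String)) :=
  let init : PvSt := (none, none, [], PySem.Dict.empty, PySem.Dict.empty)
  let fin := ((PySem.Str.split? response_text "\n").getD []).foldl pvAStep init
  let r := pvFlush fin.1 fin.2.1 fin.2.2.1 fin.2.2.2.1 fin.2.2.2.2
  (r.1.items, r.2.items)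

-- ===== PORT B =====
inductive PvTok where
  | cat : String → PvTok
  | item : String → PvTok
  | desc : String → PvTok
deriving DecidableEq, Repr

-- _tokenize: one token per meaningful line
def pvTokStep (toks : List PvTok) (raw : String) : List PvTok :=
  let line := PySem.Str.strip raw
  if line == "" || PySem.Str.startswith line "---" || PySem.Str.startswith line "###" then toks
  else if PySem.Str.isIn "Category 1" line then toks ++ [PvTok.cat "large"]
  else if PySem.Str.isIn "Category 2" line then toks ++ [PvTok.cat "small"]
  else if PySem.Str.startswith line "*   **" && PySem.Str.isIn "**" line then
    toks ++ [PvTok.item (PySem.Str.strip ((PySem.List.pyGet? (((PySem.Str.split? line "**").getD [])) 1).getD ""))]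
  else
    let cleaned := PySem.Str.strip (PySem.Str.replace (PySem.Str.replace line "*   " "") "*" "")
    if !(cleaned == "") then toks ++ [PvTok.desc cleaned] else toks

def pvTokenize (text : String) : List PvTok :=
  ((PySem.Str.split? text "\n").getD []).foldl pvTokStep []

-- _group: split the token stream at item tokens
def pvGroupStep (st : List String × List (String × List PvTok)) (tok : PvTok) :
    List String × List (String × List PvTok) :=
  match tok with
  | PvTok.item n => (st.1, st.2 ++ [(n, [])])
  | t =>
    if st.2.isEmpty then
      match t with
      | PvTok.cat c => (st.1 ++ [c], st.2)
      | _ => st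
    else
      let last := st.2.getLastD ("", [])
      (st.1, st.2.dropLast ++ [(last.1, last.2 ++ [t])])

def pvGroup (toks : List PvTok) : List String × List (String × List PvTok) :=
  toks.foldl pvGroupStep ([], [])

-- _build helpers
def pvDescOf : PvTok → Option String
  | PvTok.desc d => some d
  | _ => none

def pvCatUpd (c : Option String) : PvTok → Option String
  | PvTok.cat v => some v
  | _ => c

def pvBStep (st : Option String × PvD × PvD) (b : String × List PvTok) :
    Option String × PvD × PvD :=
  let (cat, large, small) := st
  let desc := PySem.Str.join " " (b.2.filterMap pvDescOf)
  let cat' := b.2.foldl pvCatUpd cat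
  if !(b.1 == "") && !(desc == "") then
    if cat' == some "large" then (cat', large.insert b.1 desc, small)
    else if cat' == some "small" then (cat', large, small.insert b.1 desc)
    else (cat', large, small)
  else (cat', large, small)

def pvBuild (lead : List String) (blocks : List (String × List PvTok)) : PvD × PvD :=
  let cat0 : Option String := if lead.isEmpty then none else some (lead.getLastD "")
  let fin := blocks.foldl pvBStep (cat0, PySem.Dict.empty, PySem.Dict.empty)
  (fin.2.1, fin.2.2)

def parse_equipment_response_alt (response_text : String) :
    (List (String × String)) × (List (String × String)) :=
  let g := pvGroup (pvTokenize response_text)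
  let r := pvBuild g.1 g.2
  (r.1.items, r.2.items)

-- ===== PRECONDITION & SPEC =====
def Spec_parse_equipment_response (response_text : String) (out : (List (String × String)) × (List (String × String))) : Prop := out = parse_equipment_response_alt response_text
instance (response_text : String) (out : (List (String × String)) × (List (String × String))) : Decidable (Spec_parse_equipment_response response_text out) := by unfold Spec_parse_equipment_response; infer_instance

-- ===== CLAIM (what is proved, stated in full; the proofs are below) =====
def Claim_equal_parse_equipment_response : Prop := ∀ (response_text : String), Dom_parse_equipment_response response_text → Spec_parse_equipment_response response_text (parse_equipment_response response_text)

-- ===== LEMMAS AND PROOFS =====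

theorem pv_head_not_space (c : Char) (t : List Char)
    (h : List.dropWhile PySem.Chars.isspace (c :: t) = c :: t) :
    PySem.Chars.isspace c = false := by
  by_cases hc : PySem.Chars.isspace c = true
  · rw [List.dropWhile_cons_of_pos hc] at h
    have h1 := List.length_dropWhile_le PySem.Chars.isspace t
    have h2 := congrArg List.length h
    simp at h2
    omega
  · simpa using hc


theorem pv_lstrip_of_prefix {l m : List Char} (hp : l <+: m)
    (hm : PySem.Chars.lstrip m = m) : PySem.Chars.lstrip l = l := by
  cases l with
  | nil => simp [PySem.Chars.lstrip]
  | cons c t =>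
    obtain ⟨r, hr⟩ := hp
    subst hr
    unfold PySem.Chars.lstrip at *
    have hc := pv_head_not_space c (t ++ r) (by simpa using hm)
    simp [hc]

theorem pv_rstrip_idem (cs : List Char) :
    PySem.Chars.rstrip (PySem.Chars.rstrip cs) = PySem.Chars.rstrip cs := by
  unfold PySem.Chars.rstrip
  simp [List.dropWhile_idempotent]

theorem pv_rstrip_prefix (cs : List Char) : PySem.Chars.rstrip cs <+: cs := by
  have h := List.reverse_prefix.mpr
    (List.dropWhile_suffix (l := cs.reverse) PySem.Chars.isspace)
  unfold PySem.Chars.rstrip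
  simpa using h

theorem pv_strip_idem (cs : List Char) :
    PySem.Chars.strip (PySem.Chars.strip cs) = PySem.Chars.strip cs := by
  unfold PySem.Chars.strip
  have hx : PySem.Chars.lstrip (PySem.Chars.lstrip cs) = PySem.Chars.lstrip cs := by
    unfold PySem.Chars.lstrip; exact List.dropWhile_idempotent _ _
  rw [pv_lstrip_of_prefix (pv_rstrip_prefix (PySem.Chars.lstrip cs)) hx, pv_rstrip_idem]

theorem pv_str_strip_idem (s : String) :
    PySem.Str.strip (PySem.Str.strip s) = PySem.Str.strip s := by
  apply String.toList_inj.mp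
  simp [pv_strip_idem]

theorem pv_lstrip_append (d X : List Char) (h : PySem.Chars.lstrip d = d) (hne : d ≠ []) :
    PySem.Chars.lstrip (d ++ X) = d ++ X := by
  cases d with
  | nil => exact absurd rfl hne
  | cons c t =>
    have hc := pv_head_not_space c t (by simpa [PySem.Chars.lstrip] using h)
    simp [PySem.Chars.lstrip, hc]

theorem pv_rstrip_append (Y X : List Char) (h : PySem.Chars.rstrip X = X) (hne : X ≠ []) :
    PySem.Chars.rstrip (Y ++ X) = Y ++ X := by
  have h' : PySem.Chars.lstrip X.reverse = X.reverse := by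
    have := congrArg List.reverse h
    simpa [PySem.Chars.rstrip, PySem.Chars.lstrip] using this
  have hne' : X.reverse ≠ [] := by simpa using hne
  have := pv_lstrip_append X.reverse Y.reverse h' hne'
  simp only [PySem.Chars.rstrip, PySem.Chars.lstrip] at *
  rw [List.reverse_append, this]
  simp

theorem pv_good_of_strip (cs : List Char) (h : PySem.Chars.strip cs = cs) :
    PySem.Chars.lstrip cs = cs ∧ PySem.Chars.rstrip cs = cs := by
  have hls : PySem.Chars.lstrip cs <:+ cs := List.dropWhile_suffix _
  have hrlen : (PySem.Chars.rstrip (PySem.Chars.lstrip cs)).length ≤ (PySem.Chars.lstrip cs).length := by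
    simpa [PySem.Chars.rstrip] using List.length_dropWhile_le PySem.Chars.isspace (PySem.Chars.lstrip cs).reverse
  have hlen : (PySem.Chars.lstrip cs).length = cs.length := by
    have := congrArg List.length h
    simp only [PySem.Chars.strip] at this
    have h2 := hls.length_le
    omega
  have hl : PySem.Chars.lstrip cs = cs := hls.eq_of_length hlen
  refine ⟨hl, ?_⟩
  have := h
  rw [PySem.Chars.strip, hl] at this
  exact this

-- join: all elements good → strip(join) = join and join ≠ []
theorem pv_join_good (l : List (List Char))
    (h : ∀ d ∈ l, d ≠ [] ∧ PySem.Chars.lstrip d = d ∧ PySem.Chars.rstrip d = d) :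
    (l ≠ [] → PySem.Chars.join [' '] l ≠ []) ∧
    PySem.Chars.strip (PySem.Chars.join [' '] l) = PySem.Chars.join [' '] l := by
  induction l with
  | nil => simp [PySem.Chars.join_nil, PySem.Chars.strip, PySem.Chars.lstrip, PySem.Chars.rstrip]
  | cons a rest ih =>
    obtain ⟨ha1, ha2, ha3⟩ := h a (by simp)
    cases rest with
    | nil =>
      rw [PySem.Chars.join_singleton]
      refine ⟨fun _ => ha1, ?_⟩
      rw [PySem.Chars.strip, ha2]
      exact ha3
    | cons b t =>
      obtain ⟨hj, hs⟩ := ih (fun d hd => h d (List.mem_cons_of_mem _ hd))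
      have hjne : PySem.Chars.join [' '] (b :: t) ≠ [] := hj (by simp)
      rw [PySem.Chars.join_cons_cons]
      constructor
      · intro _; simp [ha1]
      · obtain ⟨hjl, hjr⟩ := pv_good_of_strip _ hs
        rw [PySem.Chars.strip]
        rw [List.append_assoc]
        rw [pv_lstrip_append a _ ha2 ha1]
        rw [← List.append_assoc]
        rw [pv_rstrip_append _ _ hjr hjne]

theorem pv_strip_join (l : List String) (h : ∀ d ∈ l, d ≠ "" ∧ PySem.Str.strip d = d) :
    PySem.Str.strip (PySem.Str.join " " l) = PySem.Str.join " " l ∧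
      (PySem.Str.join " " l = "" ↔ l = []) := by
  have hC : ∀ d ∈ l.map String.toList,
      d ≠ [] ∧ PySem.Chars.lstrip d = d ∧ PySem.Chars.rstrip d = d := by
    intro d hd
    simp only [List.mem_map] at hd
    obtain ⟨s, hs, rfl⟩ := hd
    obtain ⟨h1, h2⟩ := h s hs
    have h1' : s.toList ≠ [] := by
      intro hh
      exact h1 (String.toList_inj.mp (by simpa using hh))
    have h2' : PySem.Chars.strip s.toList = s.toList := by
      have := congrArg String.toList h2
      simpa using this
    exact ⟨h1', pv_good_of_strip _ h2'⟩
  obtain ⟨hj, hs⟩ := pv_join_good (l.map String.toList) hC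
  have hsep : (" " : String).toList = [' '] := by decide
  constructor
  · apply String.toList_inj.mp
    simpa [PySem.Str.toList_join, hsep] using hs
  · constructor
    · intro hjoin
      by_contra hl
      have hl' : l.map String.toList ≠ [] := by simpa using hl
      apply hj hl'
      have := congrArg String.toList hjoin
      simpa [PySem.Str.toList_join, hsep] using this
    · rintro rfl
      apply String.toList_inj.mp
      simp [PySem.Str.toList_join, PySem.Chars.join_nil]

theorem pvAStep_eq (cat item : Option String) (desc : List String) (L S : PvD) (raw : String) :
    pvAStep (cat, item, desc, L, S) raw =
      (if (PySem.Str.strip raw == "" || PySem.Str.startswith (PySem.Str.strip raw) "---"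
          || PySem.Str.startswith (PySem.Str.strip raw) "###"
          || PySem.Str.startswith (PySem.Str.strip raw) "####") = true then (cat, item, desc, L, S)
       else if PySem.Str.isIn "Category 1" (PySem.Str.strip raw) = true then (some "large", item, desc, L, S)
       else if PySem.Str.isIn "Category 2" (PySem.Str.strip raw) = true then (some "small", item, desc, L, S)
       else if (PySem.Str.startswith (PySem.Str.strip raw) "*   **"
          && PySem.Str.isIn "**" (PySem.Str.strip raw)) = true then
         (cat, some (PySem.Str.strip ((PySem.List.pyGet?
            ((PySem.Str.split? (PySem.Str.strip raw) "**").getD []) 1).getD "")), [],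
          (pvFlush cat item desc L S).1, (pvFlush cat item desc L S).2)
       else if (pvItemTruthy item && !(PySem.Str.strip raw == "")
          && !(PySem.Str.startswith (PySem.Str.strip raw) "*   **")) = true then
         (if (!(PySem.Str.strip (PySem.Str.replace (PySem.Str.replace
              (PySem.Str.strip raw) "*   " "") "*" "") == "")) = true then
            (cat, item, desc ++ [PySem.Str.strip (PySem.Str.replace (PySem.Str.replace
              (PySem.Str.strip raw) "*   " "") "*" "")], L, S)
          else (cat, item, desc, L, S))
       else (cat, item, desc, L, S)) := rfl

theorem pvTokStep_eq (toks : List PvTok) (raw : String) :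
    pvTokStep toks raw =
      (if (PySem.Str.strip raw == "" || PySem.Str.startswith (PySem.Str.strip raw) "---"
          || PySem.Str.startswith (PySem.Str.strip raw) "###") = true then toks
       else if PySem.Str.isIn "Category 1" (PySem.Str.strip raw) = true then toks ++ [PvTok.cat "large"]
       else if PySem.Str.isIn "Category 2" (PySem.Str.strip raw) = true then toks ++ [PvTok.cat "small"]
       else if (PySem.Str.startswith (PySem.Str.strip raw) "*   **"
          && PySem.Str.isIn "**" (PySem.Str.strip raw)) = true then
         toks ++ [PvTok.item (PySem.Str.strip ((PySem.List.pyGet?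
            ((PySem.Str.split? (PySem.Str.strip raw) "**").getD []) 1).getD ""))]
       else if (!(PySem.Str.strip (PySem.Str.replace (PySem.Str.replace
            (PySem.Str.strip raw) "*   " "") "*" "") == "")) = true then
         toks ++ [PvTok.desc (PySem.Str.strip (PySem.Str.replace (PySem.Str.replace
            (PySem.Str.strip raw) "*   " "") "*" ""))]
       else toks) := rfl

def pvTStep (st : PvSt) (t : PvTok) : PvSt :=
  match t with
  | PvTok.cat c => (some c, st.2.1, st.2.2.1, st.2.2.2.1, st.2.2.2.2)
  | PvTok.item n =>
    (st.1, some n, [], (pvFlush st.1 st.2.1 st.2.2.1 st.2.2.2.1 st.2.2.2.2).1,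
      (pvFlush st.1 st.2.1 st.2.2.1 st.2.2.2.1 st.2.2.2.2).2)
  | PvTok.desc d =>
    if pvItemTruthy st.2.1 then (st.1, st.2.1, st.2.2.1 ++ [d], st.2.2.2.1, st.2.2.2.2) else st

theorem pv_sw_isIn (line : String) (h : PySem.Str.startswith line "*   **" = true) :
    PySem.Str.isIn "**" line = true := by
  rw [PySem.Str.isIn_iff_infix]
  rw [PySem.Str.startswith_eq, PySem.Chars.startswith_iff] at h
  exact List.IsInfix.trans (by decide) h.isInfix

theorem pv_sw4_sw3 (line : String) (h : PySem.Str.startswith line "####" = true) :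
    PySem.Str.startswith line "###" = true := by
  rw [PySem.Str.startswith_eq, PySem.Chars.startswith_iff] at *
  exact List.IsPrefix.trans (by decide) h

set_option maxHeartbeats 1000000 in
theorem pv_tokstep_append (toks : List PvTok) (raw : String) :
    pvTokStep toks raw = toks ++ pvTokStep [] raw := by
  rw [pvTokStep_eq, pvTokStep_eq]
  split_ifs <;> simp
set_option maxHeartbeats 1000000 in
theorem pv_astep_eq_tok (st : PvSt) (raw : String) :
    pvAStep st raw = (pvTokStep [] raw).foldl pvTStep st := by
  obtain ⟨cat, item, desc, L, S⟩ := st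
  rw [pvAStep_eq, pvTokStep_eq]
  by_cases he : (PySem.Str.strip raw == "") = true
  · simp only [he, Bool.true_or]
    simp
  · have he' : (PySem.Str.strip raw == "") = false := by simpa using he
    by_cases hd : PySem.Str.startswith (PySem.Str.strip raw) "---" = true
    · simp only [hd, Bool.true_or, Bool.or_true]
      simp
    · have hd' : PySem.Str.startswith (PySem.Str.strip raw) "---" = false := by simpa using hd
      by_cases h3 : PySem.Str.startswith (PySem.Str.strip raw) "###" = true
      · simp only [h3, Bool.true_or, Bool.or_true]
        simp
      · have h3' : PySem.Str.startswith (PySem.Str.strip raw) "###" = false := by simpa using h3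
        have h4' : PySem.Str.startswith (PySem.Str.strip raw) "####" = false := by
          by_contra hh
          simp only [Bool.not_eq_false] at hh
          exact absurd (pv_sw4_sw3 _ hh) h3
        simp only [he', hd', h3', h4', Bool.or_false, Bool.false_or]
        by_cases hc1 : PySem.Str.isIn "Category 1" (PySem.Str.strip raw) = true
        · simp only [hc1]
          simp [pvTStep]
        · have hc1' : PySem.Str.isIn "Category 1" (PySem.Str.strip raw) = false := by simpa using hc1
          simp only [hc1']
          by_cases hc2 : PySem.Str.isIn "Category 2" (PySem.Str.strip raw) = true
          · simp only [hc2]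
            simp [pvTStep]
          · have hc2' : PySem.Str.isIn "Category 2" (PySem.Str.strip raw) = false := by simpa using hc2
            simp only [hc2']
            by_cases hsw : PySem.Str.startswith (PySem.Str.strip raw) "*   **" = true
            · have hin := pv_sw_isIn _ hsw
              simp only [hsw, hin, Bool.and_self]
              simp [pvTStep]
            · have hsw' : PySem.Str.startswith (PySem.Str.strip raw) "*   **" = false := by
                simpa using hsw
              simp only [hsw', Bool.false_and, Bool.and_false, Bool.not_false, Bool.and_true]
              by_cases hcl : (PySem.Str.strip (PySem.Str.replace (PySem.Str.replace
                  (PySem.Str.strip raw) "*   " "") "*" "") == "") = true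
              · simp only [hcl, Bool.not_true, he']
                cases hit : pvItemTruthy item <;> simp [pvTStep, hit]
              · have hcl' : (PySem.Str.strip (PySem.Str.replace (PySem.Str.replace
                    (PySem.Str.strip raw) "*   " "") "*" "") == "") = false := by simpa using hcl
                simp only [hcl', Bool.not_false, he', Bool.and_true]
                cases hit : pvItemTruthy item <;> simp [pvTStep, hit]


def pvNotItem : PvTok → Bool
  | PvTok.item _ => false
  | _ => true

def pvSegs : List PvTok → List (String × List PvTok)
  | [] => []
  | PvTok.item n :: ts => (n, ts.takeWhile pvNotItem) :: pvSegs (ts.dropWhile pvNotItem)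
  | PvTok.cat _ :: ts => pvSegs ts
  | PvTok.desc _ :: ts => pvSegs ts
termination_by l => l.length
decreasing_by
  · have := List.length_dropWhile_le pvNotItem ts; simp; omega
  · simp
  · simp

def pvCatOf : PvTok → Option String
  | PvTok.cat c => some c
  | _ => none

theorem pv_group_last (toks : List PvTok) (lead : List String)
    (ss : List (String × List PvTok)) (n : String) (acc : List PvTok) :
    toks.foldl pvGroupStep (lead, ss ++ [(n, acc)]) =
      (lead, ss ++ [(n, acc ++ toks.takeWhile pvNotItem)] ++ pvSegs (toks.dropWhile pvNotItem)) := by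
  induction toks generalizing ss n acc with
  | nil => simp [pvSegs]
  | cons t ts ih =>
    cases t with
    | item m =>
      rw [List.foldl_cons]
      have hstep : pvGroupStep (lead, ss ++ [(n, acc)]) (PvTok.item m)
          = (lead, (ss ++ [(n, acc)]) ++ [(m, [])]) := rfl
      rw [hstep, ih (ss ++ [(n, acc)]) m []]
      simp [pvSegs, pvNotItem, List.takeWhile, List.dropWhile]
    | cat c =>
      rw [List.foldl_cons]
      have hstep : pvGroupStep (lead, ss ++ [(n, acc)]) (PvTok.cat c)
          = (lead, ss ++ [(n, acc ++ [PvTok.cat c])]) := by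
        simp [pvGroupStep, List.getLastD_concat, List.dropLast_concat]
      rw [hstep, ih ss n (acc ++ [PvTok.cat c])]
      simp [pvNotItem, List.takeWhile, List.dropWhile]
    | desc d =>
      rw [List.foldl_cons]
      have hstep : pvGroupStep (lead, ss ++ [(n, acc)]) (PvTok.desc d)
          = (lead, ss ++ [(n, acc ++ [PvTok.desc d])]) := by
        simp [pvGroupStep, List.getLastD_concat, List.dropLast_concat]
      rw [hstep, ih ss n (acc ++ [PvTok.desc d])]
      simp [pvNotItem, List.takeWhile, List.dropWhile]

theorem pv_group_nil (toks : List PvTok) (lead : List String) :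
    toks.foldl pvGroupStep (lead, []) =
      (lead ++ (toks.takeWhile pvNotItem).filterMap pvCatOf, pvSegs (toks.dropWhile pvNotItem)) := by
  induction toks generalizing lead with
  | nil => simp [pvSegs]
  | cons t ts ih =>
    cases t with
    | item m =>
      rw [List.foldl_cons]
      have hstep : pvGroupStep (lead, []) (PvTok.item m) = (lead, [(m, [])]) := rfl
      rw [hstep, show ([(m, [])] : List (String × List PvTok)) = [] ++ [(m, [])] from rfl,
        pv_group_last ts lead [] m []]
      simp [pvSegs, pvNotItem, List.takeWhile, List.dropWhile]
    | cat c =>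
      rw [List.foldl_cons]
      have hstep : pvGroupStep (lead, []) (PvTok.cat c) = (lead ++ [c], []) := rfl
      rw [hstep, ih (lead ++ [c])]
      simp [pvSegs, pvNotItem, pvCatOf, List.takeWhile, List.dropWhile]
    | desc d =>
      rw [List.foldl_cons]
      have hstep : pvGroupStep (lead, []) (PvTok.desc d) = (lead, []) := rfl
      rw [hstep, ih lead]
      simp [pvSegs, pvNotItem, pvCatOf, List.takeWhile, List.dropWhile]


-- ---- block-pass facts ----

theorem pvBStep_eq (cat : Option String) (L S : PvD) (n : String) (seg : List PvTok) :
    pvBStep (cat, L, S) (n, seg) =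
      (if (!(n == "") && !(PySem.Str.join " " (seg.filterMap pvDescOf) == "")) = true then
        (if (seg.foldl pvCatUpd cat == some "large") = true then
          (seg.foldl pvCatUpd cat, L.insert n (PySem.Str.join " " (seg.filterMap pvDescOf)), S)
         else if (seg.foldl pvCatUpd cat == some "small") = true then
          (seg.foldl pvCatUpd cat, L, S.insert n (PySem.Str.join " " (seg.filterMap pvDescOf)))
         else (seg.foldl pvCatUpd cat, L, S))
       else (seg.foldl pvCatUpd cat, L, S)) := rfl

theorem pv_catupd_map_desc (c : Option String) (l : List String) :
    (l.map PvTok.desc).foldl pvCatUpd c = c := by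
  induction l generalizing c with
  | nil => rfl
  | cons a t ih => simpa [pvCatUpd] using ih c

theorem pv_filterMap_map_desc (l : List String) :
    (l.map PvTok.desc).filterMap pvDescOf = l := by
  induction l with
  | nil => rfl
  | cons a t ih => simp [pvDescOf]

theorem pv_bstep_flush (cat : Option String) (L S : PvD) (n : String) (desc : List String)
    (h : ∀ d ∈ desc, d ≠ "" ∧ PySem.Str.strip d = d) :
    pvBStep (cat, L, S) (n, desc.map PvTok.desc) =
      (cat, pvFlush cat (some n) desc L S) := by
  obtain ⟨hstrip, hempty⟩ := pv_strip_join desc h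
  rw [pvBStep_eq, pv_catupd_map_desc, pv_filterMap_map_desc]
  have hje : (PySem.Str.join " " desc == "") = desc.isEmpty := by
    cases hd : desc.isEmpty
    · simp only [List.isEmpty_eq_false_iff] at hd
      simp [hempty, hd]
    · simp only [List.isEmpty_iff] at hd
      subst hd
      simp [hempty]
  unfold pvFlush
  rw [hje, hstrip]
  have hit : pvItemTruthy (some n) = !(n == "") := rfl
  rw [hit, Option.getD_some]
  split_ifs <;> rfl

theorem pv_bstep_mid_cat (cat : Option String) (L S : PvD) (n c : String)
    (l : List String) (Y : List PvTok) :
    pvBStep (cat, L, S) (n, l.map PvTok.desc ++ (PvTok.cat c :: Y)) =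
      pvBStep (some c, L, S) (n, l.map PvTok.desc ++ Y) := by
  rw [pvBStep_eq, pvBStep_eq]
  have h1 : (l.map PvTok.desc ++ (PvTok.cat c :: Y)).foldl pvCatUpd cat
      = (l.map PvTok.desc ++ Y).foldl pvCatUpd (some c) := by
    rw [List.foldl_append, List.foldl_append, pv_catupd_map_desc, pv_catupd_map_desc,
      List.foldl_cons]
    rfl
  have h2 : (l.map PvTok.desc ++ (PvTok.cat c :: Y)).filterMap pvDescOf
      = (l.map PvTok.desc ++ Y).filterMap pvDescOf := by
    simp [List.filterMap_append, pvDescOf]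
  rw [h1, h2]

theorem pv_bstep_empty_mid_desc (st : Option String × PvD × PvD) (d : String)
    (l : List String) (Y : List PvTok) :
    pvBStep st ("", l.map PvTok.desc ++ (PvTok.desc d :: Y)) =
      pvBStep st ("", l.map PvTok.desc ++ Y) := by
  obtain ⟨cat, L, S⟩ := st
  rw [pvBStep_eq, pvBStep_eq]
  have h1 : (l.map PvTok.desc ++ (PvTok.desc d :: Y)).foldl pvCatUpd cat
      = (l.map PvTok.desc ++ Y).foldl pvCatUpd cat := by
    rw [List.foldl_append, List.foldl_append, List.foldl_cons]
    rfl
  rw [h1]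
  simp

-- ---- the main induction ----

def pvRun (st : Option String × PvD × PvD) (bs : List (String × List PvTok)) : PvD × PvD :=
  let r := bs.foldl pvBStep st
  (r.2.1, r.2.2)

def pvFin (st : PvSt) : PvD × PvD :=
  pvFlush st.1 st.2.1 st.2.2.1 st.2.2.2.1 st.2.2.2.2

def pvGoodDesc (d : String) : Prop := d ≠ "" ∧ PySem.Str.strip d = d

theorem pv_main (toks : List PvTok) (cat item : Option String) (desc : List String)
    (L S : PvD)
    (htoks : ∀ t ∈ toks, ∀ d, t = PvTok.desc d → pvGoodDesc d)
    (hdesc : ∀ d ∈ desc, pvGoodDesc d) :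
    pvFin (toks.foldl pvTStep (cat, item, desc, L, S)) =
      match item with
      | none => pvRun ((toks.takeWhile pvNotItem).foldl pvCatUpd cat, L, S)
          (pvSegs (toks.dropWhile pvNotItem))
      | some n => pvRun (cat, L, S)
          ((n, desc.map PvTok.desc ++ toks.takeWhile pvNotItem) :: pvSegs (toks.dropWhile pvNotItem)) := by
  induction toks generalizing cat item desc L S with
  | nil =>
    cases item with
    | none =>
      simp only [List.foldl_nil, List.takeWhile_nil, List.dropWhile_nil]
      simp [pvFin, pvRun, pvSegs, pvFlush, pvItemTruthy]
    | some n =>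
      simp only [List.foldl_nil, List.takeWhile_nil, List.dropWhile_nil]
      simp only [pvSegs, pvRun, List.foldl_cons, List.foldl_nil, List.append_nil]
      rw [pv_bstep_flush cat L S n desc hdesc]
      rfl
  | cons t ts ih =>
    have htoks' : ∀ t' ∈ ts, ∀ d, t' = PvTok.desc d → pvGoodDesc d :=
      fun t' ht' => htoks t' (List.mem_cons_of_mem _ ht')
    cases t with
    | cat c =>
      rw [List.foldl_cons]
      have hstep : pvTStep (cat, item, desc, L, S) (PvTok.cat c)
          = (some c, item, desc, L, S) := rfl
      rw [hstep]
      cases item with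
      | none =>
        rw [ih (some c) none desc L S htoks' hdesc]
        simp only [List.takeWhile_cons, List.dropWhile_cons]
        simp [pvNotItem, pvCatUpd]
      | some n =>
        rw [ih (some c) (some n) desc L S htoks' hdesc]
        simp only [List.takeWhile_cons, List.dropWhile_cons]
        simp only [pvNotItem, if_true]
        show pvRun (some c, L, S) ((n, desc.map PvTok.desc ++ ts.takeWhile pvNotItem) :: pvSegs (ts.dropWhile pvNotItem))
          = pvRun (cat, L, S) ((n, desc.map PvTok.desc ++ (PvTok.cat c :: ts.takeWhile pvNotItem)) :: pvSegs (ts.dropWhile pvNotItem))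
        unfold pvRun
        rw [List.foldl_cons, List.foldl_cons, pv_bstep_mid_cat]
    | item m =>
      rw [List.foldl_cons]
      have hstep : pvTStep (cat, item, desc, L, S) (PvTok.item m)
          = (cat, some m, [], (pvFlush cat item desc L S).1, (pvFlush cat item desc L S).2) := rfl
      rw [hstep]
      rw [ih cat (some m) [] (pvFlush cat item desc L S).1 (pvFlush cat item desc L S).2 htoks'
        (by intro d hd; cases hd)]
      cases item with
      | none =>
        have hfl : pvFlush cat none desc L S = (L, S) := by
          simp [pvFlush, pvItemTruthy]
        rw [hfl]
        simp only [List.takeWhile_cons, List.dropWhile_cons]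
        simp only [pvNotItem, Bool.false_eq_true, if_false]
        simp [pvSegs, List.foldl_cons]
      | some n =>
        simp only [List.takeWhile_cons, List.dropWhile_cons]
        simp only [pvNotItem, Bool.false_eq_true, if_false]
        show pvRun (cat, (pvFlush cat (some n) desc L S).1, (pvFlush cat (some n) desc L S).2)
            ((m, List.map PvTok.desc [] ++ ts.takeWhile pvNotItem) :: pvSegs (ts.dropWhile pvNotItem))
          = pvRun (cat, L, S) ((n, desc.map PvTok.desc ++ []) :: pvSegs (PvTok.item m :: ts))
        unfold pvRun
        rw [List.foldl_cons, List.foldl_cons]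
        have hsegs : pvSegs (PvTok.item m :: ts)
            = (m, ts.takeWhile pvNotItem) :: pvSegs (ts.dropWhile pvNotItem) := by
          simp [pvSegs]
        rw [hsegs, List.append_nil, pv_bstep_flush cat L S n desc hdesc]
        simp [List.foldl_cons]
    | desc d =>
      have hgood : pvGoodDesc d := htoks _ (by simp) d rfl
      rw [List.foldl_cons]
      cases item with
      | none =>
        have hstep : pvTStep (cat, none, desc, L, S) (PvTok.desc d)
            = (cat, none, desc, L, S) := rfl
        rw [hstep, ih cat none desc L S htoks' hdesc]
        simp only [List.takeWhile_cons, List.dropWhile_cons]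
        simp [pvNotItem, pvCatUpd]
      | some n =>
        by_cases hn : (n == "") = true
        · have hn' : n = "" := by simpa using hn
          subst hn'
          have hstep : pvTStep (cat, some "", desc, L, S) (PvTok.desc d)
              = (cat, some "", desc, L, S) := by
            simp [pvTStep, pvItemTruthy]
          rw [hstep, ih cat (some "") desc L S htoks' hdesc]
          simp only [List.takeWhile_cons, List.dropWhile_cons]
          simp only [pvNotItem, if_true]
          unfold pvRun
          rw [List.foldl_cons, List.foldl_cons, pv_bstep_empty_mid_desc]
        · have hstep : pvTStep (cat, some n, desc, L, S) (PvTok.desc d)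
              = (cat, some n, desc ++ [d], L, S) := by
            simp [pvTStep, pvItemTruthy, hn]
          rw [hstep, ih cat (some n) (desc ++ [d]) L S htoks'
            (by intro x hx; rcases List.mem_append.mp hx with h | h
                · exact hdesc x h
                · simp at h; subst h; exact hgood)]
          simp only [List.takeWhile_cons, List.dropWhile_cons]
          simp only [pvNotItem, if_true]
          simp [List.map_append, List.append_assoc]

-- ---- the tokens of a response are well-formed (stripped, nonempty description lines) ----

set_option maxHeartbeats 1000000 in
theorem pv_tok_good_fold (raws : List String) (acc : List PvTok)
    (hacc : ∀ t ∈ acc, ∀ d, t = PvTok.desc d → pvGoodDesc d) :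
    ∀ t ∈ raws.foldl pvTokStep acc, ∀ d, t = PvTok.desc d → pvGoodDesc d := by
  induction raws generalizing acc with
  | nil => simpa using hacc
  | cons raw ts ih =>
    rw [List.foldl_cons]
    apply ih
    intro t ht d hd
    subst hd
    rw [pvTokStep_eq] at ht
    split_ifs at ht with h1 h2 h3 h4 h5
    · exact hacc _ ht _ rfl
    · rcases List.mem_append.mp ht with h | h
      · exact hacc _ h _ rfl
      · rw [List.mem_singleton] at h
        exact PvTok.noConfusion h
    · rcases List.mem_append.mp ht with h | h
      · exact hacc _ h _ rfl
      · rw [List.mem_singleton] at h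
        exact PvTok.noConfusion h
    · rcases List.mem_append.mp ht with h | h
      · exact hacc _ h _ rfl
      · rw [List.mem_singleton] at h
        exact PvTok.noConfusion h
    · rcases List.mem_append.mp ht with h | h
      · exact hacc _ h _ rfl
      · rw [List.mem_singleton] at h
        have hde : d = PySem.Str.strip (PySem.Str.replace (PySem.Str.replace
            (PySem.Str.strip raw) "*   " "") "*" "") := by
          injection h
        constructor
        · intro hcontra
          rw [← hde] at h5
          rw [hcontra] at h5
          simp at h5
        · rw [hde]
          exact pv_str_strip_idem _
    · exact hacc _ ht _ rfl

-- ---- line fold = token fold ----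

theorem pv_tok_acc (raws : List String) (acc : List PvTok) :
    raws.foldl pvTokStep acc = acc ++ raws.foldl pvTokStep [] := by
  induction raws generalizing acc with
  | nil => simp
  | cons raw ts ih =>
    rw [List.foldl_cons, List.foldl_cons, pv_tokstep_append acc raw,
      ih (acc ++ pvTokStep [] raw), ih (pvTokStep [] raw)]
    simp

theorem pv_fold_lines (raws : List String) (st : PvSt) :
    raws.foldl pvAStep st = (raws.foldl pvTokStep []).foldl pvTStep st := by
  induction raws generalizing st with
  | nil => rfl
  | cons raw ts ih =>
    rw [List.foldl_cons, ih (pvAStep st raw), pv_astep_eq_tok st raw, List.foldl_cons,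
      pv_tok_acc ts (pvTokStep [] raw), List.foldl_append]

-- ---- the category in effect before the first item is the last lead category ----

theorem pv_cat0 (l : List PvTok) (c : Option String) :
    l.foldl pvCatUpd c =
      (if (l.filterMap pvCatOf).isEmpty then c else some ((l.filterMap pvCatOf).getLastD "")) := by
  induction l generalizing c with
  | nil => simp
  | cons t ts ih =>
    cases t with
    | cat v =>
      rw [List.foldl_cons, show pvCatUpd c (PvTok.cat v) = some v from rfl, ih]
      simp only [List.filterMap_cons, show pvCatOf (PvTok.cat v) = some v from rfl]
      cases hr : ts.filterMap pvCatOf with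
      | nil => simp
      | cons a r => simp
    | item m =>
      rw [List.foldl_cons, show pvCatUpd c (PvTok.item m) = c from rfl, ih]
      simp only [List.filterMap_cons, show pvCatOf (PvTok.item m) = none from rfl]
    | desc d =>
      rw [List.foldl_cons, show pvCatUpd c (PvTok.desc d) = c from rfl, ih]
      simp only [List.filterMap_cons, show pvCatOf (PvTok.desc d) = none from rfl]

-- ---- assembly ----

theorem pv_final (text : String) :
    parse_equipment_response text = parse_equipment_response_alt text := by
  have hA : parse_equipment_response text
      = (let fin := pvFin ((pvTokenize text).foldl pvTStep
          (none, none, [], PySem.Dict.empty, PySem.Dict.empty));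
         (fin.1.items, fin.2.items)) := by
    show (let fin := pvFin (((PySem.Str.split? text "\n").getD []).foldl pvAStep
          (none, none, [], PySem.Dict.empty, PySem.Dict.empty));
        (fin.1.items, fin.2.items)) = _
    rw [pv_fold_lines]
    rfl
  have hmain := pv_main (pvTokenize text) none none [] PySem.Dict.empty PySem.Dict.empty
    (pv_tok_good_fold _ _ (by intro t ht; cases ht)) (by intro d hd; cases hd)
  have hgroup : pvGroup (pvTokenize text)
      = (((pvTokenize text).takeWhile pvNotItem).filterMap pvCatOf,
         pvSegs ((pvTokenize text).dropWhile pvNotItem)) := by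
    rw [pvGroup, pv_group_nil]
    simp
  have hB : parse_equipment_response_alt text
      = (let r := pvRun ((if (((pvTokenize text).takeWhile pvNotItem).filterMap pvCatOf).isEmpty
            then none
            else some ((((pvTokenize text).takeWhile pvNotItem).filterMap pvCatOf).getLastD "")),
          PySem.Dict.empty, PySem.Dict.empty) (pvSegs ((pvTokenize text).dropWhile pvNotItem));
         (r.1.items, r.2.items)) := by
    show (let g := pvGroup (pvTokenize text);
          let r := pvBuild g.1 g.2;
          (r.1.items, r.2.items)) = _
    rw [hgroup]
    rfl
  rw [hA, hB]
  simp only [hmain, pv_cat0]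

-- ===== VERDICT (by name: the statement is the Claim_ definition above) =====
theorem parse_equipment_response_spec : Claim_equal_parse_equipment_response := by
  intro response_text _
  unfold Spec_parse_equipment_response
  exact pv_final response_text
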